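-- pv_equiv track=rewrite | github.com/ymetz/rlhfblender | rlhfblender/routes/demo_generation.py | _sanitize_component
-- ===== SOURCE A (Python) =====
-- from typing import Any, Dict, List, Optional
--
-- def _sanitize_component(value: Optional[Any]) -> str:
--     """Create a filesystem-friendly identifier component."""
--     if value is None:
--         return "unknown"
--     text = str(value).strip()
--     if not text:
--         return "unknown"
--     for token in ("/", "\\", ":", " "):
--         text = text.replace(token, "_")
--     return text
-- ===== SOURCE B (Python) =====
-- def _sanitize_component(value):
--     """Create a filesystem-friendly identifier component."""
--     if value is None:
--         return "unknown"
--     text = str(value).strip()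
--     if not text:
--         return "unknown"
--     return "".join("_" if c in {"/", "\\", ":", " "} else c for c in text)
-- ===== Notes on version B (the rewrite author's own statement) =====
-- stated objective: simpler
-- what changed: Replaces the loop of four sequential whole-string replace() scans with a single character-level pass that substitutes an underscore for each of the four separator characters via one membership test per character.
import Mathlib
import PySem

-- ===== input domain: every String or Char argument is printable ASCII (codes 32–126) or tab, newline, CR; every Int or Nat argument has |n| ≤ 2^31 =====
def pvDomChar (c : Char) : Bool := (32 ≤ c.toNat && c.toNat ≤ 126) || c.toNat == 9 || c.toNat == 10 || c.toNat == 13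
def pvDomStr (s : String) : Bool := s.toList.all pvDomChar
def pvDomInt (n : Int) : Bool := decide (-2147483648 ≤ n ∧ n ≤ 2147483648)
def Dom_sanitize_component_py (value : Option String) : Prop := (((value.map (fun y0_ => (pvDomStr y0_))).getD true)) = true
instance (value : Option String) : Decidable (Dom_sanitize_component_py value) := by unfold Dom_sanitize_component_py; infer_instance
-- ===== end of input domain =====

-- B: one character-level pass with a membership test instead of four sequential .replace scans (objective: simpler).
-- ===== PORT A =====
def sanitize_component_py (value : Option String) : String :=
  match value with
  | none => "unknown"
  | some v =>
    let text := PySem.Str.strip v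
    if text = "" then "unknown"
    else
      -- for token in ("/", "\\", ":", " "): text = text.replace(token, "_")
      ["/", "\\", ":", " "].foldl (fun t tok => PySem.Str.replace t tok "_") text

-- ===== PORT B =====
def sanitize_component_py_alt (value : Option String) : String :=
  match value with
  | none => "unknown"
  | some v =>
    let text := PySem.Str.strip v
    if text = "" then "unknown"
    else String.ofList (text.toList.map (fun c => if ['/', '\\', ':', ' '].contains c then '_' else c))

-- ===== PRECONDITION & SPEC =====
def Spec_sanitize_component_py (value : Option String) (out : String) : Prop := out = sanitize_component_py_alt value
instance (value : Option String) (out : String) : Decidable (Spec_sanitize_component_py value out) := by unfold Spec_sanitize_component_py; infer_instance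

-- ===== CLAIM (what is proved, stated in full; the proofs are below) =====
def Claim_equal_sanitize_component_py : Prop := ∀ (value : Option String), Dom_sanitize_component_py value → Spec_sanitize_component_py value (sanitize_component_py value)

-- ===== LEMMAS AND PROOFS =====

-- single-char replace.go is a pointwise map
theorem replace_go_single (o n : Char) : ∀ (l acc : List Char) (fuel : Nat), l.length ≤ fuel →
    PySem.Chars.replace.go [o] [n] fuel l acc =
      acc.reverse ++ l.map (fun c => if c = o then n else c) := by
  intro l
  induction l with
  | nil => intro acc fuel _; cases fuel <;> simp [PySem.Chars.replace.go]
  | cons c t ih =>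
    intro acc fuel hf
    cases fuel with
    | zero => simp at hf
    | succ f =>
      simp only [PySem.Chars.replace.go]
      by_cases h : c = o
      · subst h
        have : List.isPrefixOf [c] (c :: t) = true := by simp [List.isPrefixOf]
        rw [if_pos this]
        simp only [List.length_cons, List.length_nil, List.drop_succ_cons, List.drop_zero]
        rw [ih _ f (by simpa using Nat.succ_le_succ_iff.mp hf)]
        simp
      · have : List.isPrefixOf [o] (c :: t) = false := by
          simp [List.isPrefixOf]; exact fun hh => absurd hh.symm h
        rw [if_neg (by simp [this])]
        rw [ih _ f (by simpa using Nat.succ_le_succ_iff.mp hf)]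
        simp [h]

-- single-char replace = map
theorem replace_single (o n : Char) (s : List Char) :
    PySem.Chars.replace s [o] [n] = s.map (fun c => if c = o then n else c) := by
  rw [PySem.Chars.replace]
  simp only [List.isEmpty_cons]
  simpa using replace_go_single o n s [] s.length le_rfl

-- ===== VERDICT (by name: the statement is the Claim_ definition above) =====
theorem sanitize_component_py_spec : Claim_equal_sanitize_component_py := by
  unfold Claim_equal_sanitize_component_py Spec_sanitize_component_py
  intro value _
  cases value with
  | none => rfl
  | some v =>
    simp only [sanitize_component_py, sanitize_component_py_alt, List.foldl]
    split
    · rfl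
    · have h : ∀ (t : String), (PySem.Str.replace (PySem.Str.replace (PySem.Str.replace (PySem.Str.replace t "/" "_") "\\" "_") ":" "_") " " "_").toList
          = t.toList.map (fun c => if ['/', '\\', ':', ' '].contains c then '_' else c) := by
        intro t
        simp [replace_single, List.map_map]
        intro c _
        by_cases h1 : c = '/' <;> by_cases h2 : c = '\\' <;> by_cases h3 : c = ':' <;> by_cases h4 : c = ' ' <;>
          simp [h1, h2, h3, h4]
      rw [← String.ofList_toList (s := PySem.Str.replace _ _ _), h]
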